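-- pv_equiv track=rewrite | github.com/glkuzi/targer | utils_data.py | generate_corpus
-- ===== SOURCE A (Python) =====
-- def generate_corpus(sequences, caseless=True):
--     feature_str_seq_list = list()
--     label_str_seq_list = list()
--     feature_str_unique_list = list()
--     label_str_map = dict()
--     for doc in sequences:
--         curr_feature_str_seq_list = []
--         curr_label_str_seq_list = []
--         for token in doc:
--             fs, ls = token[0], token[1]
--             if caseless: fs = fs.lower()
--             curr_feature_str_seq_list.append(fs)
--             curr_label_str_seq_list.append(ls)
--             if fs not in feature_str_unique_list: feature_str_unique_list.append(fs)
--             if ls not in label_str_map: label_str_map[ls] = len(label_str_map)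
--         feature_str_seq_list.append(curr_feature_str_seq_list)
--         label_str_seq_list.append(curr_label_str_seq_list)
--     return feature_str_seq_list, label_str_seq_list, feature_str_unique_list, label_str_map
-- ===== SOURCE B (Python) =====
-- def generate_corpus(sequences, caseless=True):
--     # Build the two sequence lists directly.
--     feature_str_seq_list = [[t[0].lower() if caseless else t[0] for t in doc]
--                             for doc in sequences]
--     label_str_seq_list = [[t[1] for t in doc] for doc in sequences]
--     flat_f = [fs for seq in feature_str_seq_list for fs in seq]
--     flat_l = [ls for seq in label_str_seq_list for ls in seq]
--     # First-occurrence index of every feature/label: scan backwards and overwrite,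
--     # so the earliest index wins -- no membership test anywhere.
--     first_f = {}
--     for i, fs in reversed(list(enumerate(flat_f))):
--         first_f[fs] = i
--     first_l = {}
--     for i, ls in reversed(list(enumerate(flat_l))):
--         first_l[ls] = i
--     # First-seen order == ascending first-occurrence index.
--     feature_str_unique_list = sorted(first_f, key=first_f.__getitem__)
--     label_str_map = {ls: k for k, ls in
--                      enumerate(sorted(first_l, key=first_l.__getitem__))}
--     return feature_str_seq_list, label_str_seq_list, feature_str_unique_list, label_str_map
-- ===== Notes on version B (the rewrite author's own statement) =====
-- stated objective: faster
-- what changed: Replaces A's interleaved first-seen accumulation (O(V) list membership scan and grow-as-you-go dict) by a different algorithm: a backward overwrite pass over the flattened enumerated tokens computes each feature's/label's first-occurrence index with no membership tests at all, then sorting the keys by that index recovers first-seen order, and enumerating the sorted labels yields the index map.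
import Mathlib
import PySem

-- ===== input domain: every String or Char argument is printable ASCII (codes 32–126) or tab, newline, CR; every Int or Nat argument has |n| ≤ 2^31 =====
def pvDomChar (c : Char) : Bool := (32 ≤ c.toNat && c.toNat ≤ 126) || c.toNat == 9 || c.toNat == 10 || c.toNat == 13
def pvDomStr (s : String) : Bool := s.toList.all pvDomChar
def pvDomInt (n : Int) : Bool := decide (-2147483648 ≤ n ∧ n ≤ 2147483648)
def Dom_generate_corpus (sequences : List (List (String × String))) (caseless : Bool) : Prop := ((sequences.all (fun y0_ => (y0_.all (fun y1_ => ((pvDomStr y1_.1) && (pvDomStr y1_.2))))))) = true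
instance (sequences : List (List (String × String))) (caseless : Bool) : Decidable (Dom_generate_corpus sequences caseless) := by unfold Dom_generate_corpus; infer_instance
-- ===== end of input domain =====

-- B replaces A's interleaved first-seen accumulation by a different algorithm: a backward
-- overwrite pass computes each feature's/label's first-occurrence index (no membership tests),
-- then sorting the keys by that index recovers first-seen order (alternative decomposition).


-- ===== PORT A =====
-- literal transliteration: one loop over docs, inner loop over tokens, all four
-- accumulators threaded together; 'fs not in feature_str_unique_list' is a list scan.
def generate_corpus (sequences : List (List (String × String))) (caseless : Bool) : List (List String) × List (List String) × List String × (List (String × Int)) :=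
  let st := sequences.foldl
    (fun (st : List (List String) × List (List String) × List String × PySem.Dict String Int) doc =>
      let inner := doc.foldl
        (fun (cur : List String × List String × List String × PySem.Dict String Int) token =>
          let fs0 := token.1
          let ls := token.2
          let fs := if caseless then PySem.Str.lower fs0 else fs0
          let cf := cur.1 ++ [fs]
          let cl := cur.2.1 ++ [ls]
          let uniq := if fs ∈ cur.2.2.1 then cur.2.2.1 else cur.2.2.1 ++ [fs]
          let m := if cur.2.2.2.contains ls then cur.2.2.2 else cur.2.2.2.insert ls cur.2.2.2.size
          (cf, cl, uniq, m))
        ([], [], st.2.2.1, st.2.2.2)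
      (st.1 ++ [inner.1], st.2.1 ++ [inner.2.1], inner.2.2.1, inner.2.2.2))
    ([], [], [], (PySem.Dict.empty : PySem.Dict String Int))
  (st.1, st.2.1, st.2.2.1, st.2.2.2.items)

-- ===== PORT B =====
-- transliteration of Source B: sequence lists by maps, flattening comprehensions by flatMap,
-- the backward overwrite passes as folds over reversed enumerations, then sorted-by-index.
-- (Python's first_f[k] in the sort key cannot miss — every key is in the dict — so it is
-- ported exactly by getD with any default.)
def generate_corpus_alt (sequences : List (List (String × String))) (caseless : Bool) : List (List String) × List (List String) × List String × (List (String × Int)) :=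
  let fseqs := sequences.map (fun doc => doc.map (fun t => if caseless then PySem.Str.lower t.1 else t.1))
  let lseqs := sequences.map (fun doc => doc.map (fun t => t.2))
  let flatF := fseqs.flatMap (fun s => s)
  let flatL := lseqs.flatMap (fun s => s)
  let firstF := (PySem.List.enumerate flatF 0).reverse.foldl
    (fun (d : PySem.Dict String Int) p => d.insert p.2 p.1) PySem.Dict.empty
  let firstL := (PySem.List.enumerate flatL 0).reverse.foldl
    (fun (d : PySem.Dict String Int) p => d.insert p.2 p.1) PySem.Dict.empty
  let uniq := PySem.List.sorted firstF.keys (fun k => firstF.getD k 0) false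
  let labels := PySem.List.sorted firstL.keys (fun k => firstL.getD k 0) false
  let m := (PySem.List.enumerate labels 0).foldl
    (fun (d : PySem.Dict String Int) p => d.insert p.2 p.1) PySem.Dict.empty
  (fseqs, lseqs, uniq, m.items)

-- ===== PRECONDITION & SPEC =====
def Spec_generate_corpus (sequences : List (List (String × String))) (caseless : Bool) (out : List (List String) × List (List String) × List String × (List (String × Int))) : Prop := out = generate_corpus_alt sequences caseless
instance (sequences : List (List (String × String))) (caseless : Bool) (out : List (List String) × List (List String) × List String × (List (String × Int))) : Decidable (Spec_generate_corpus sequences caseless out) := by unfold Spec_generate_corpus; infer_instance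

-- ===== CLAIM (what is proved, stated in full; the proofs are below) =====
def Claim_equal_generate_corpus : Prop := ∀ (sequences : List (List (String × String))) (caseless : Bool), Dom_generate_corpus sequences caseless → Spec_generate_corpus sequences caseless (generate_corpus sequences caseless)

-- ===== LEMMAS AND PROOFS =====

-- the per-token feature transform
def pvF (caseless : Bool) (t : String × String) : String :=
  if caseless then PySem.Str.lower t.1 else t.1

-- A's ordered-dedup fold
def pvDed (u : List String) (xs : List String) : List String :=
  xs.foldl (fun u fs => if fs ∈ u then u else u ++ [fs]) u

-- A's first-seen label-index fold
def pvDM (d : PySem.Dict String Int) (xs : List String) : PySem.Dict String Int :=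
  xs.foldl (fun d ls => if d.contains ls then d else d.insert ls d.size) d

-- B's backward-overwrite first-index dict
def pvFirst (flat : List String) : PySem.Dict String Int :=
  (PySem.List.enumerate flat 0).reverse.foldl
    (fun (d : PySem.Dict String Int) p => d.insert p.2 p.1) PySem.Dict.empty

-- B's enumerate-into-dict build
def pvEnumD (us : List String) : PySem.Dict String Int :=
  (PySem.List.enumerate us 0).foldl
    (fun (d : PySem.Dict String Int) p => d.insert p.2 p.1) PySem.Dict.empty

-- A's inner token loop, characterised on an arbitrary starting state
theorem pvA_inner (caseless : Bool) (doc : List (String × String))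
    (cf cl : List String) (u : List String) (d : PySem.Dict String Int) :
    doc.foldl
      (fun (cur : List String × List String × List String × PySem.Dict String Int) token =>
        let fs0 := token.1
        let ls := token.2
        let fs := if caseless then PySem.Str.lower fs0 else fs0
        let cf := cur.1 ++ [fs]
        let cl := cur.2.1 ++ [ls]
        let uniq := if fs ∈ cur.2.2.1 then cur.2.2.1 else cur.2.2.1 ++ [fs]
        let m := if cur.2.2.2.contains ls then cur.2.2.2 else cur.2.2.2.insert ls cur.2.2.2.size
        (cf, cl, uniq, m))
      (cf, cl, u, d)
    = (cf ++ doc.map (pvF caseless), cl ++ doc.map Prod.snd,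
       pvDed u (doc.map (pvF caseless)), pvDM d (doc.map Prod.snd)) := by
  induction doc generalizing cf cl u d with
  | nil => simp [pvDed, pvDM]
  | cons t ts ih =>
      simp only [List.foldl_cons, List.map_cons, pvDed, pvDM, List.foldl_cons]
      rw [ih]
      simp [pvDed, pvDM, pvF]

-- A's outer loop, characterised on an arbitrary starting state
theorem pvA_outer (caseless : Bool) (seqs : List (List (String × String)))
    (fa la : List (List String)) (u : List String) (d : PySem.Dict String Int) :
    seqs.foldl
      (fun (st : List (List String) × List (List String) × List String × PySem.Dict String Int) doc =>
        let inner := doc.foldl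
          (fun (cur : List String × List String × List String × PySem.Dict String Int) token =>
            let fs0 := token.1
            let ls := token.2
            let fs := if caseless then PySem.Str.lower fs0 else fs0
            let cf := cur.1 ++ [fs]
            let cl := cur.2.1 ++ [ls]
            let uniq := if fs ∈ cur.2.2.1 then cur.2.2.1 else cur.2.2.1 ++ [fs]
            let m := if cur.2.2.2.contains ls then cur.2.2.2 else cur.2.2.2.insert ls cur.2.2.2.size
            (cf, cl, uniq, m))
          ([], [], st.2.2.1, st.2.2.2)
        (st.1 ++ [inner.1], st.2.1 ++ [inner.2.1], inner.2.2.1, inner.2.2.2))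
      (fa, la, u, d)
    = (fa ++ seqs.map (fun doc => doc.map (pvF caseless)),
       la ++ seqs.map (fun doc => doc.map Prod.snd),
       seqs.foldl (fun u doc => pvDed u (doc.map (pvF caseless))) u,
       seqs.foldl (fun d doc => pvDM d (doc.map Prod.snd)) d) := by
  induction seqs generalizing fa la u d with
  | nil => simp
  | cons doc ds ih =>
      simp only [List.foldl_cons]
      rw [pvA_inner]
      rw [ih]
      simp

-- A's dedup fold IS PySem.Set.update
theorem pvDed_eq_update (u xs : List String) : pvDed u xs = PySem.Set.update u xs := by
  simp only [pvDed, PySem.Set.update]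
  induction xs generalizing u with
  | nil => rfl
  | cons x xs ih => simp only [List.foldl_cons, PySem.Set.add_eq_ite]; exact ih _

-- folding pvDed over the segments = one pvDed over the flattening
theorem pvDed_foldl_flat (seqs : List (List String)) (u : List String) :
    seqs.foldl (fun u s => pvDed u s) u = pvDed u (seqs.flatMap (fun s => s)) := by
  induction seqs generalizing u with
  | nil => simp [pvDed]
  | cons s ss ih => simp only [List.foldl_cons, List.flatMap_cons, pvDed, List.foldl_append] at *; rw [ih]

theorem pvDM_foldl_flat (seqs : List (List String)) (d : PySem.Dict String Int) :
    seqs.foldl (fun d s => pvDM d s) d = pvDM d (seqs.flatMap (fun s => s)) := by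
  induction seqs generalizing d with
  | nil => simp [pvDM]
  | cons s ss ih => simp only [List.foldl_cons, List.flatMap_cons, pvDM, List.foldl_append] at *; rw [ih]

-- first-occurrence dedup, cons characterisation (generalised over the accumulator)
theorem update_eq_append_filter (xs u : List String) :
    PySem.Set.update u xs = u ++ (PySem.Set.ofList xs).filter (fun y => y ∉ u) := by
  induction xs generalizing u with
  | nil => simp [PySem.Set.update, PySem.Set.ofList]
  | cons x xs ih =>
      have hcons : PySem.Set.ofList (x :: xs) = x :: (PySem.Set.ofList xs).filter (fun y => y ≠ x) := by
        have h1 : PySem.Set.ofList (x :: xs) = PySem.Set.update [x] xs := by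
          simp [PySem.Set.ofList_eq_foldl, PySem.Set.update, PySem.Set.add]
        rw [h1, ih]
        simp
      by_cases hx : x ∈ u
      · have hstep : PySem.Set.update u (x :: xs) = PySem.Set.update u xs := by
          simp [PySem.Set.update, PySem.Set.add_of_mem hx]
        rw [hstep, ih, hcons, List.filter_cons_of_neg (by simp [hx])]
        congr 1
        rw [List.filter_filter]
        apply List.filter_congr
        intro y _
        by_cases hy : y ∈ u
        · simp [hy]
        · have hyx : y ≠ x := fun h => hy (h ▸ hx)
          simp [hy, hyx]
      · have hstep : PySem.Set.update u (x :: xs) = PySem.Set.update (u ++ [x]) xs := by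
          simp [PySem.Set.update, PySem.Set.add_of_not_mem hx]
        rw [hstep, ih, hcons, List.filter_cons_of_pos (by simp [hx])]
        simp only [List.append_assoc, List.singleton_append]
        congr 1
        congr 1
        rw [List.filter_filter]
        apply List.filter_congr
        intro y _
        by_cases hy : y ∈ u <;> by_cases hyx : y = x <;> simp [hy, hyx]

theorem ofList_cons_eq (x : String) (xs : List String) :
    PySem.Set.ofList (x :: xs) = x :: (PySem.Set.ofList xs).filter (fun y => y ≠ x) := by
  have h1 : PySem.Set.ofList (x :: xs) = PySem.Set.update [x] xs := by
    simp [PySem.Set.ofList_eq_foldl, PySem.Set.update, PySem.Set.add]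
  rw [h1, update_eq_append_filter]
  simp

-- first-occurrence indices are strictly increasing along the first-seen dedup
theorem pairwise_idxOf (flat : List String) :
    (PySem.Set.ofList flat).Pairwise (fun a b => flat.idxOf a < flat.idxOf b) := by
  induction flat with
  | nil => simp [PySem.Set.ofList]
  | cons x xs ih =>
      rw [ofList_cons_eq]
      constructor
      · intro b hb
        have hbx : b ≠ x := by
          have := List.of_mem_filter hb
          simpa using this
        simp [hbx.symm]
      · have h2 : ((PySem.Set.ofList xs).filter (fun y => y ≠ x)).Pairwise
            (fun a b => xs.idxOf a < xs.idxOf b) := List.Pairwise.filter _ ih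
        apply h2.imp_of_mem
        intro a b ha hb hab
        have hax : a ≠ x := by have := List.of_mem_filter ha; simpa using this
        have hbx : b ≠ x := by have := List.of_mem_filter hb; simpa using this
        have h1 : (x :: xs).idxOf a = xs.idxOf a + 1 := by simp [hax.symm]
        have h2 : (x :: xs).idxOf b = xs.idxOf b + 1 := by simp [hbx.symm]
        rw [h1, h2]
        omega

-- find? over an enumeration locates the first occurrence
theorem find?_enumerate (flat : List String) (k : String) (s : Int) (hk : k ∈ flat) :
    (PySem.List.enumerate flat s).find? (fun p => p.2 == k) = some (s + flat.idxOf k, k) := by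
  induction flat generalizing s with
  | nil => simp at hk
  | cons x xs ih =>
      rw [PySem.List.enumerate_cons]
      by_cases hx : x = k
      · subst hx
        simp
      · have hk' : k ∈ xs := by
          rcases List.mem_cons.mp hk with h | h
          · exact absurd h.symm hx
          · exact h
        have hne : (x == k) = false := by simp [hx]
        simp only [List.find?_cons, hne]
        rw [ih (s + 1) hk']
        have : (x :: xs).idxOf k = xs.idxOf k + 1 := by
          simp [List.idxOf_cons, hne]
        rw [this]
        congr 2
        push_cast
        ring

-- getD of the backward-overwrite dict = first-occurrence index
theorem revFold_getD (l : List (Int × String)) (d0 : PySem.Dict String Int) (k : String) (c : Int) :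
    ((l.reverse.foldl (fun (d : PySem.Dict String Int) p => d.insert p.2 p.1) d0).getD k c)
    = match l.find? (fun p => p.2 == k) with
      | some p => p.1
      | none => d0.getD k c := by
  induction l generalizing d0 with
  | nil => simp
  | cons p t ih =>
      simp only [List.reverse_cons, List.foldl_append, List.foldl_cons, List.foldl_nil,
        List.find?_cons]
      by_cases hk : p.2 = k
      · simp [hk, PySem.Dict.getD_insert_self]
      · have : (p.2 == k) = false := by simp [hk]
        rw [PySem.Dict.getD_insert_of_ne _ p.1 c (fun h => hk h.symm)]
        rw [ih]
        simp [this]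

theorem pvFirst_getD (flat : List String) (k : String) (hk : k ∈ flat) :
    (pvFirst flat).getD k 0 = (flat.idxOf k : Int) := by
  rw [pvFirst, revFold_getD, find?_enumerate flat k 0 hk]
  simp

theorem pvFirst_keys (flat : List String) :
    (pvFirst flat).keys = PySem.Set.ofList flat.reverse := by
  rw [pvFirst]
  rw [PySem.Dict.keys_foldl_insert_key ((PySem.List.enumerate flat 0).reverse)
    (fun p => p.2) (fun _ p => p.1) PySem.Dict.empty]
  have : ((PySem.List.enumerate flat 0).reverse.map (fun p => p.2)) = flat.reverse := by
    rw [List.map_reverse, PySem.List.map_snd_enumerate]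
  rw [this]
  simp [PySem.Set.ofList_eq_foldl, PySem.Set.update, PySem.Dict.keys_empty]

-- MAIN: sorting the keys by first-occurrence index recovers first-seen order
theorem sorted_first_eq_dedup (flat : List String) :
    PySem.List.sorted (pvFirst flat).keys (fun k => (pvFirst flat).getD k 0) false
      = PySem.Set.ofList flat := by
  apply PySem.List.sorted_eq_of_perm_of_pairwise_lt
  · rw [pvFirst_keys]
    rw [List.perm_ext_iff_of_nodup (PySem.Set.nodup_ofList _) (PySem.Set.nodup_ofList _)]
    intro a
    simp [PySem.Set.mem_ofList]
  · apply (pairwise_idxOf flat).imp_of_mem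
    intro a b ha hb hab
    rw [pvFirst_getD flat a (by simpa [PySem.Set.mem_ofList] using ha),
        pvFirst_getD flat b (by simpa [PySem.Set.mem_ofList] using hb)]
    exact_mod_cast hab

-- pvEnumD facts
theorem pvEnumD_items (us : List String) (hnd : us.Nodup) :
    (pvEnumD us).items = (PySem.List.enumerate us 0).map (fun p => (p.2, p.1)) := by
  rw [pvEnumD]
  have := PySem.Dict.items_foldl_insert_fresh (l := PySem.List.enumerate us 0)
    (k := fun p => p.2) (v := fun p => p.1) (d := PySem.Dict.empty)
    (by intro a _; simp) (by rw [PySem.List.map_snd_enumerate]; exact hnd)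
  simpa using this

theorem pvEnumD_keys (us : List String) (hnd : us.Nodup) :
    (pvEnumD us).keys = us := by
  have h := pvEnumD_items us hnd
  show (pvEnumD us).items.map (·.1) = us
  rw [h, List.map_map]
  have : ((fun (p : String × Int) => p.1) ∘ (fun (p : Int × String) => (p.2, p.1)))
      = fun (p : Int × String) => p.2 := rfl
  rw [this, PySem.List.map_snd_enumerate]

theorem pvEnumD_size (us : List String) (hnd : us.Nodup) :
    (pvEnumD us).size = us.length := by
  show (pvEnumD us).items.length = us.length
  rw [pvEnumD_items us hnd, List.length_map, PySem.List.length_enumerate]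

theorem pvEnumD_snoc (us : List String) (x : String) :
    (pvEnumD us).insert x (us.length : Int) = pvEnumD (us ++ [x]) := by
  rw [pvEnumD, pvEnumD, PySem.List.enumerate_append]
  simp [List.foldl_append]

-- A's label fold, starting from an enumerate-built dict, lands on the dedup's enumerate dict
theorem pvDM_enumD (xs : List String) (us : List String) (hnd : us.Nodup) :
    pvDM (pvEnumD us) xs = pvEnumD (PySem.Set.update us xs) := by
  induction xs generalizing us with
  | nil => simp [pvDM, PySem.Set.update]
  | cons x xs ih =>
      have hupd : PySem.Set.update us (x :: xs) = PySem.Set.update (PySem.Set.add us x) xs := by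
        simp [PySem.Set.update]
      rw [hupd]
      simp only [pvDM, List.foldl_cons]
      have hcont : (pvEnumD us).contains x = decide (x ∈ us) := by
        rw [PySem.Dict.contains_eq_decide_mem_keys, pvEnumD_keys us hnd]
      by_cases hx : x ∈ us
      · have : (pvEnumD us).contains x = true := by simp [hcont, hx]
        rw [this]
        simp only [if_pos]
        rw [PySem.Set.add_of_mem hx]
        exact ih us hnd
      · have : (pvEnumD us).contains x = false := by simp [hcont, hx]
        rw [this]
        rw [if_neg Bool.false_ne_true]
        rw [PySem.Set.add_of_not_mem hx]
        have hsz : (pvEnumD us).size = us.length := pvEnumD_size us hnd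
        rw [show ((pvEnumD us).insert x (pvEnumD us).size) = pvEnumD (us ++ [x]) by
          rw [hsz]; exact_mod_cast pvEnumD_snoc us x]
        exact ih (us ++ [x]) (by simp [List.nodup_append, hnd]; exact fun a ha h => hx (h ▸ ha))

-- A's label fold from the empty dict = the enumerate-dict of the first-seen dedup
theorem pvDM_ofList (xs : List String) :
    pvDM PySem.Dict.empty xs = pvEnumD (PySem.Set.ofList xs) := by
  have h := pvDM_enumD xs [] (by simp)
  have h0 : pvEnumD [] = (PySem.Dict.empty : PySem.Dict String Int) := rfl
  have h1 : PySem.Set.update [] xs = PySem.Set.ofList xs := by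
    simp [PySem.Set.ofList_eq_foldl, PySem.Set.update]
  rw [h0, h1] at h
  exact h

-- ===== VERDICT (by name: the statement is the Claim_ definition above) =====
theorem generate_corpus_spec : Claim_equal_generate_corpus := by
  intro seqs caseless _
  show generate_corpus seqs caseless = generate_corpus_alt seqs caseless
  simp only [generate_corpus, generate_corpus_alt, pvA_outer]
  rw [show seqs.foldl (fun u doc => pvDed u (doc.map (pvF caseless))) []
      = (seqs.map (fun doc => doc.map (pvF caseless))).foldl (fun u s => pvDed u s) [] by
    rw [List.foldl_map]]
  rw [show seqs.foldl (fun d doc => pvDM d (doc.map Prod.snd)) PySem.Dict.empty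
      = (seqs.map (fun doc => doc.map Prod.snd)).foldl (fun d s => pvDM d s) PySem.Dict.empty by
    rw [List.foldl_map]]
  rw [pvDed_foldl_flat, pvDM_foldl_flat]
  rw [show pvDed [] ((seqs.map (fun doc => doc.map (pvF caseless))).flatMap (fun s => s))
      = PySem.Set.ofList ((seqs.map (fun doc => doc.map (pvF caseless))).flatMap (fun s => s)) by
    rw [pvDed_eq_update]; simp [PySem.Set.ofList_eq_foldl, PySem.Set.update]]
  rw [pvDM_ofList]
  have hs := sorted_first_eq_dedup ((seqs.map (fun doc => doc.map (pvF caseless))).flatMap (fun s => s))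
  have hl := sorted_first_eq_dedup ((seqs.map (fun doc => doc.map Prod.snd)).flatMap (fun s => s))
  rw [← hs, ← hl]
  simp only [pvFirst, pvEnumD]
  rfl
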